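-- pv_equiv track=rewrite | github.com/pypi-data/pypi-mirror-48 | packages/fluxpyt/fluxpyt-0.1.5.tar.gz/fluxpyt-0.1.5/fluxpyt/mid_corr.py | stepCV
-- ===== SOURCE A (Python) =====
-- def stepCV(CV,columns):
--
--
--     cm = []
--     for i in range(columns):
--
--
--         t1 = []
--
--         t2 = [0]*i
--         t1 = t1+t2
--
--         for item in CV:
--             t1.append(item)
--
--         cm.append(t1)
--
--     for j in range(columns):
--         diff = len(cm[columns-1])-len(cm[j])
--         cm[j] = cm[j] + [0]*diff
--
--
--     return cm
-- ===== SOURCE B (Python) =====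
-- def stepCV(CV, columns):
--     if columns <= 0:
--         return []
--     row = list(CV) + [0] * (columns - 1)
--     cm = [row]
--     for _ in range(columns - 1):
--         row = [0] + row[:-1]
--         cm.append(row)
--     return cm
-- ===== Notes on version B (the rewrite author's own statement) =====
-- stated objective: alternative
-- what changed: B builds only the first row (CV plus columns-1 zeros) and derives each subsequent row incrementally as a right shift of the previous one ([0]+row[:-1]), instead of A's two passes that rebuild every row from zeros+CV and then pad each row to the last row's length.
import Mathlib
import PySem

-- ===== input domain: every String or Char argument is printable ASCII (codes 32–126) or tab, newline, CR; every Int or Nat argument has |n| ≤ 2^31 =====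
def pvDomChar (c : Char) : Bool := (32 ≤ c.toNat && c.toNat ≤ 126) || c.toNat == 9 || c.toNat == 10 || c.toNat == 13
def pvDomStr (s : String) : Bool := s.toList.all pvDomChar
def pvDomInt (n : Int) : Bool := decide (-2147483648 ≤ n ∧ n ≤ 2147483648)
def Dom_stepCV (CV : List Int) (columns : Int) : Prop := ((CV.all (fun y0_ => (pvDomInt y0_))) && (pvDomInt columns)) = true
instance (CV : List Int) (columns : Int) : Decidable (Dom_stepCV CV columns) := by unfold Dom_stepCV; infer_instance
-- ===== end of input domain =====

-- B builds only the first row and derives each next row as a right shift ([0]+row[:-1]) of the previous one,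
-- replacing A's rebuild-every-row-then-pad two-pass construction; objective: alternative.

-- ===== PORT A =====
def stepCV (CV : List Int) (columns : Int) : List (List Int) :=
  let cm : List (List Int) :=
    (PySem.List.pyRange 0 columns 1).foldl
      (fun cm i =>
        let t1 : List Int := []
        let t2 : List Int := List.replicate i.toNat 0
        let t1 := t1 ++ t2
        let t1 := CV.foldl (fun t1 item => t1 ++ [item]) t1
        cm ++ [t1]) []
  (PySem.List.pyRange 0 columns 1).foldl
    (fun cm j =>
      let diff : Int :=
        ((PySem.List.pyGetD cm (columns - 1) []).length : Int)
          - ((PySem.List.pyGetD cm j []).length : Int)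
      PySem.List.pySetD cm j (PySem.List.pyGetD cm j [] ++ List.replicate diff.toNat 0)) cm

-- ===== PORT B =====
def stepCV_alt (CV : List Int) (columns : Int) : List (List Int) :=
  if columns ≤ 0 then []
  else
    let row : List Int := CV ++ List.replicate (columns - 1).toNat 0
    ((PySem.List.pyRange 0 (columns - 1) 1).foldl
      (fun (st : List (List Int) × List Int) _ =>
        let row : List Int := 0 :: PySem.List.slice st.2 none (some (-1))
        (st.1 ++ [row], row)) ([row], row)).1

-- ===== PRECONDITION & SPEC =====
def Spec_stepCV (CV : List Int) (columns : Int) (out : List (List Int)) : Prop := out = stepCV_alt CV columns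
instance (CV : List Int) (columns : Int) (out : List (List Int)) : Decidable (Spec_stepCV CV columns out) := by unfold Spec_stepCV; infer_instance

-- ===== CLAIM (what is proved, stated in full; the proofs are below) =====
def Claim_equal_stepCV : Prop := ∀ (CV : List Int) (columns : Int), Dom_stepCV CV columns → Spec_stepCV CV columns (stepCV CV columns)

-- ===== LEMMAS AND PROOFS =====

-- the unpadded row built by A's first loop
def pvRowG (CV : List Int) (i : Nat) : List Int := List.replicate i 0 ++ CV
-- the final padded row (n = number of columns)
def pvRowF (CV : List Int) (n i : Nat) : List Int :=
  List.replicate i 0 ++ CV ++ List.replicate (n - 1 - i) 0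

theorem pvSet_map_range {α : Type} (n k : Nat) (hk : k < n)
    (f : Nat → α) (v : α) :
    ((List.range n).map f).set k v
      = (List.range n).map (fun j => if j = k then v else f j) := by
  apply List.ext_getElem
  · simp
  · intro i h1 h2
    rw [List.getElem_set]
    by_cases hik : i = k
    · subst hik; simp
    · simp [hik, Ne.symm hik]

theorem pvGetD_map_range {α : Type} (n k : Nat) (hk : k < n) (f : Nat → α) (d : α) :
    ((List.range n).map f).getD k d = f k := by
  rw [List.getD_eq_getElem?_getD]
  simp [hk]

-- invariant of A's second loop, folding the remaining indices [k, n)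
theorem pvPadLoop (CV : List Int) (n k : Nat) (hk : k ≤ n) :
    ((PySem.List.pyRange (k : Int) (n : Int) 1).foldl
      (fun cm j =>
        let diff : Int :=
          ((PySem.List.pyGetD cm ((n : Int) - 1) []).length : Int)
            - ((PySem.List.pyGetD cm j []).length : Int)
        PySem.List.pySetD cm j (PySem.List.pyGetD cm j [] ++ List.replicate diff.toNat 0))
      ((List.range n).map (fun j => if j < k then pvRowF CV n j else pvRowG CV j)))
    = (List.range n).map (pvRowF CV n) := by
  induction' hm : n - k with m ih generalizing k
  · have hkn : k = n := by omega
    subst hkn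
    rw [PySem.List.pyRange_one_eq_nil (by omega), List.foldl_nil]
    apply List.map_congr_left
    intro j hj
    simp only [List.mem_range] at hj
    simp [hj]
  · have hkn : k < n := by omega
    rw [PySem.List.pyRange_one_cons (by exact_mod_cast hkn), List.foldl_cons]
    have hstep :
        (let cm := (List.range n).map (fun j => if j < k then pvRowF CV n j else pvRowG CV j)
         let diff : Int :=
            ((PySem.List.pyGetD cm ((n : Int) - 1) []).length : Int)
              - ((PySem.List.pyGetD cm ((k : Nat) : Int) []).length : Int)
         PySem.List.pySetD cm ((k : Nat) : Int) (PySem.List.pyGetD cm ((k : Nat) : Int) [] ++ List.replicate diff.toNat 0))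
        = (List.range n).map (fun j => if j < k + 1 then pvRowF CV n j else pvRowG CV j) := by
      simp only []
      have hn1 : (n : Int) - 1 = ((n - 1 : Nat) : Int) := by omega
      have hget1 :
          PySem.List.pyGetD ((List.range n).map (fun j => if j < k then pvRowF CV n j else pvRowG CV j)) ((n : Int) - 1) ([] : List Int)
            = pvRowG CV (n - 1) := by
        rw [hn1, PySem.List.pyGetD_natCast, pvGetD_map_range n (n - 1) (by omega)]
        have : ¬ (n - 1 < k) := by omega
        simp [this]
      have hgetk :
          PySem.List.pyGetD ((List.range n).map (fun j => if j < k then pvRowF CV n j else pvRowG CV j)) ((k : Nat) : Int) ([] : List Int)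
            = pvRowG CV k := by
        rw [PySem.List.pyGetD_natCast, pvGetD_map_range n k hkn]
        simp
      simp only [hget1, hgetk, PySem.List.pySetD_natCast]
      have hdiff : (((pvRowG CV (n - 1)).length : Int) - ((pvRowG CV k).length : Int)).toNat
          = n - 1 - k := by
        simp only [pvRowG, List.length_append, List.length_replicate]
        omega
      rw [hdiff, pvSet_map_range n k hkn]
      apply List.map_congr_left
      intro j hj
      by_cases hjk : j = k
      · subst hjk
        simp [pvRowG, pvRowF]
      · have : (j < k + 1) ↔ (j < k) := by omega
        simp [hjk, this]
    rw [hstep]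
    have hk1 : ((k : Int) + 1) = ((k + 1 : Nat) : Int) := by omega
    rw [hk1, ih (k + 1) (by omega) (by omega)]

theorem pvFirstLoop (CV : List Int) (columns : Int) :
    ((PySem.List.pyRange 0 columns 1).foldl
      (fun cm i =>
        let t1 : List Int := []
        let t2 : List Int := List.replicate i.toNat 0
        let t1 := t1 ++ t2
        let t1 := CV.foldl (fun t1 item => t1 ++ [item]) t1
        cm ++ [t1]) [])
    = (List.range columns.toNat).map (fun i => pvRowG CV i) := by
  have hinner : ∀ i : Int,
      CV.foldl (fun t1 item => t1 ++ [item]) (([] : List Int) ++ List.replicate i.toNat 0)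
        = pvRowG CV i.toNat := by
    intro i
    rw [PySem.List.foldl_append_singleton_eq_self]
    simp [pvRowG]
  simp only [hinner]
  rw [PySem.List.foldl_append_singleton_eq_map, PySem.List.pyRange_one]
  simp

-- one right shift: prepending 0 and dropping the last zero advances the row index
theorem pvShift (CV : List Int) (n k : Nat) (h : k + 1 < n) :
    (0 : Int) :: (pvRowF CV n k).dropLast = pvRowF CV n (k + 1) := by
  unfold pvRowF
  have hm : n - 1 - k = (n - 1 - (k + 1)) + 1 := by omega
  rw [hm, List.replicate_succ' (n := n - 1 - (k + 1)) (a := (0 : Int))]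
  rw [show List.replicate k (0:Int) ++ CV ++ (List.replicate (n - 1 - (k+1)) (0:Int) ++ [0])
        = (List.replicate k (0:Int) ++ CV ++ List.replicate (n - 1 - (k+1)) (0:Int)) ++ [0] by
      simp [List.append_assoc]]
  rw [List.dropLast_concat]
  rw [List.replicate_succ]
  simp

-- invariant of B's shift loop, folding the remaining indices [k, n-1)
theorem pvShiftLoop (CV : List Int) (n k : Nat) (hk : k < n) :
    ((PySem.List.pyRange (k : Int) ((n : Int) - 1) 1).foldl
      (fun (st : List (List Int) × List Int) _ =>
        let row : List Int := 0 :: PySem.List.slice st.2 none (some (-1))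
        (st.1 ++ [row], row))
      ((List.range (k + 1)).map (pvRowF CV n), pvRowF CV n k)).1
    = (List.range n).map (pvRowF CV n) := by
  induction' hm : n - 1 - k with m ih generalizing k
  · have hkn : k = n - 1 := by omega
    rw [PySem.List.pyRange_one_eq_nil (by omega), List.foldl_nil]
    have : k + 1 = n := by omega
    rw [this]
  · have hkn : k + 1 < n := by omega
    rw [PySem.List.pyRange_one_cons (by exact_mod_cast (by omega : (k : Int) < (n : Int) - 1)), List.foldl_cons]
    have hrow : (0 : Int) :: PySem.List.slice (pvRowF CV n k) none (some (-1)) = pvRowF CV n (k + 1) := by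
      rw [PySem.List.slice_to_neg_one, pvShift CV n k hkn]
    simp only [hrow]
    have hcons : (List.range (k + 1)).map (pvRowF CV n) ++ [pvRowF CV n (k + 1)]
        = (List.range (k + 2)).map (pvRowF CV n) := by
      simp [List.range_succ]
    rw [hcons]
    have hk1 : ((k : Int) + 1) = ((k + 1 : Nat) : Int) := by omega
    rw [hk1, ih (k + 1) (by omega) (by omega)]

theorem pvAltEq (CV : List Int) (columns : Int) :
    stepCV_alt CV columns = (List.range columns.toNat).map (pvRowF CV columns.toNat) := by
  unfold stepCV_alt
  by_cases hc : columns ≤ 0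
  · have : columns.toNat = 0 := by omega
    simp [hc, this]
  · simp only [if_neg hc]
    set n := columns.toNat with hn
    have hpos : 0 < n := by omega
    have hrow0 : CV ++ List.replicate (columns - 1).toNat 0 = pvRowF CV n 0 := by
      unfold pvRowF
      have : (columns - 1).toNat = n - 1 - 0 := by omega
      simp [this]
    have hrange : PySem.List.pyRange 0 (columns - 1) 1
        = PySem.List.pyRange ((0 : Nat) : Int) ((n : Int) - 1) 1 := by
      congr 1
      omega
    have hinit : [pvRowF CV n 0] = (List.range (0 + 1)).map (pvRowF CV n) := by
      simp
    rw [hrange, hrow0, hinit]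
    exact pvShiftLoop CV n 0 hpos

-- ===== VERDICT (by name: the statement is the Claim_ definition above) =====
theorem stepCV_spec : Claim_equal_stepCV := by
  intro CV columns _
  unfold Spec_stepCV
  show stepCV CV columns = stepCV_alt CV columns
  unfold stepCV
  rw [pvFirstLoop, pvAltEq]
  by_cases hc : columns ≤ 0
  · rw [PySem.List.pyRange_one_eq_nil (by omega)]
    have : columns.toNat = 0 := by omega
    simp [this]
  · set n := columns.toNat with hn
    have hcn : columns = (n : Int) := by omega
    have h0 : (List.range n).map (fun i => pvRowG CV i)
        = (List.range n).map (fun j => if j < 0 then pvRowF CV n j else pvRowG CV j) := by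
      simp
    rw [hcn, h0]
    have := pvPadLoop CV n 0 (by omega)
    simpa using this
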